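-- pv_equiv track=rewrite | github.com/aaasif-isu/SLM_FL_HPO | code/parse/create_json_file_v2.py | balance_braces
-- ===== SOURCE A (Python) =====
-- from typing import Optional, Dict, Any, List
--
-- def balance_braces(s: str) -> Optional[str]:
--     """Trim to last balanced closing brace starting at first '{'."""
--     first = s.find("{")
--     if first == -1:
--         return None
--     s = s[first:]
--     depth, last_good = 0, -1
--     for i, ch in enumerate(s):
--         if ch == "{":
--             depth += 1
--         elif ch == "}":
--             depth -= 1
--             if depth == 0:
--                 last_good = i
--     return s[:last_good + 1] if last_good != -1 else None
-- ===== SOURCE B (Python) =====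
-- def balance_braces(s: str):
--     """Trim to last balanced closing brace starting at first '{'.
--
--     Prefix-depth table + backward scan for the last closing brace at depth 0,
--     instead of a single forward loop carrying a running counter."""
--     first = s.find("{")
--     if first == -1:
--         return None
--     t = s[first:]
--     depths = []
--     d = 0
--     for c in t:
--         d += (c == "{") - (c == "}")
--         depths.append(d)
--     for i in range(len(t) - 1, -1, -1):
--         if t[i] == "}" and depths[i] == 0:
--             return t[: i + 1]
--     return None
-- ===== Notes on version B (the rewrite author's own statement) =====
-- stated objective: alternative
-- what changed: A's single forward loop carrying a running depth and a last-good index is replaced by building a cumulative prefix-depth table and then scanning backward for the last closing brace at depth 0.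
import Mathlib
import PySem

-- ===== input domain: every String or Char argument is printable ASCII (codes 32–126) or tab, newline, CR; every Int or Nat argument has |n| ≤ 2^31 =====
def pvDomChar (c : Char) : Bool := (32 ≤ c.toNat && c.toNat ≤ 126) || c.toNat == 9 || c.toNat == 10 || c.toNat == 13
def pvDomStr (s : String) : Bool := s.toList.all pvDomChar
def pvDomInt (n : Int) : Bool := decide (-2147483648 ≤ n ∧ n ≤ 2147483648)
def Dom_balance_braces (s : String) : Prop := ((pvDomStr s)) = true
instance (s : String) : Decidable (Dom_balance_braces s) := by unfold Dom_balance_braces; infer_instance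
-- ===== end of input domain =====

-- B replaces A's single forward loop (running depth + last-good index) by a prefix-depth
-- table plus a separate backward scan for the last '}' at depth 0 (objective: alternative).

-- ===== PORT A =====
-- A's loop body: running (depth, last_good), updated per enumerated char
def bbStepA (st : Int × Int) (p : Int × Char) : Int × Int :=
  if p.2 == '{' then (st.1 + 1, st.2)
  else if p.2 == '}' then
    let d := st.1 - 1
    (d, if d == 0 then p.1 else st.2)
  else st

-- A's loop: for i, ch in enumerate(s) with state (depth, last_good) = (0, -1)
def bbFoldA (cs : List Char) : Int × Int := (PySem.List.enumerate cs 0).foldl bbStepA (0, -1)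

def balance_braces (s : String) : Option String :=
  let first := PySem.Str.find s "{"
  if first == -1 then none
  else
    let t := PySem.List.slice s.toList (some first) none
    let r := bbFoldA t
    if r.2 != -1 then some (String.ofList (PySem.List.slice t none (some (r.2 + 1)))) else none

-- ===== PORT B =====
-- B's first loop: build the cumulative-depth table (appending, as Source B does)
def bbDepths (t : List Char) : List Int × Int :=
  t.foldl (fun acc c =>
    let d := acc.2 + (if c == '{' then 1 else 0) - (if c == '}' then 1 else 0)
    (acc.1 ++ [d], d)) ([], 0)

-- B's second loop: for i in range(len(t)-1, -1, -1); fuel n = i+1 (n = 0 ↔ loop exhausted)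
def bbScan (t : List Char) (depths : List Int) : Nat → Option String
  | 0 => none
  | n + 1 =>
    if t[n]? == some '}' && depths[n]? == some 0 then
      some (String.ofList (t.take (n + 1)))
    else bbScan t depths n

def balance_braces_alt (s : String) : Option String :=
  let first := PySem.Str.find s "{"
  if first == -1 then none
  else
    let t := PySem.List.slice s.toList (some first) none
    bbScan t (bbDepths t).1 t.length

-- ===== PRECONDITION & SPEC =====
def Spec_balance_braces (s : String) (out : Option String) : Prop := out = balance_braces_alt s
instance (s : String) (out : Option String) : Decidable (Spec_balance_braces s out) := by unfold Spec_balance_braces; infer_instance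

-- ===== CLAIM (what is proved, stated in full; the proofs are below) =====
def Claim_equal_balance_braces : Prop := ∀ (s : String), Dom_balance_braces s → Spec_balance_braces s (balance_braces s)

-- ===== LEMMAS AND PROOFS =====

-- character delta and prefix depth, the shared characterisation of both loops
def bbDelta (c : Char) : Int := (if c == '{' then 1 else 0) - (if c == '}' then 1 else 0)

def bbD (cs : List Char) : Int := (cs.map bbDelta).sum

theorem bbD_snoc (cs : List Char) (c : Char) : bbD (cs ++ [c]) = bbD cs + bbDelta c := by
  simp [bbD]

theorem bbD_cons (c : Char) (cs : List Char) : bbD (c :: cs) = bbDelta c + bbD cs := by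
  simp [bbD]

theorem bbFoldA_snoc (cs : List Char) (c : Char) :
    bbFoldA (cs ++ [c]) = bbStepA (bbFoldA cs) ((cs.length : Int), c) := by
  simp [bbFoldA, PySem.List.enumerate_append, PySem.List.enumerate_cons, PySem.List.enumerate_nil,
    List.foldl_append]

theorem bbFoldA_fst (cs : List Char) : (bbFoldA cs).1 = bbD cs := by
  induction cs using List.reverseRecOn with
  | nil => simp [bbFoldA, bbD, PySem.List.enumerate_nil]
  | append_singleton cs c ih =>
    rw [bbFoldA_snoc, bbD_snoc, ← ih]
    simp only [bbStepA, bbDelta]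
    by_cases h1 : c == '{' <;> by_cases h2 : c == '}' <;> simp_all <;> omega

theorem bbFoldA_snd_bounds (cs : List Char) :
    -1 ≤ (bbFoldA cs).2 ∧ (bbFoldA cs).2 < cs.length := by
  induction cs using List.reverseRecOn with
  | nil =>
    constructor
    · simp [bbFoldA, PySem.List.enumerate_nil]
    · simp [bbFoldA, PySem.List.enumerate_nil]
  | append_singleton cs c ih =>
    rw [bbFoldA_snoc]
    obtain ⟨h1, h2⟩ := ih
    simp only [bbStepA, List.length_append, List.length_cons, List.length_nil]
    split_ifs <;> push_cast at * <;> omega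

-- B's table fold, characterised from an arbitrary accumulator
theorem bbDepths_go (cs : List Char) : ∀ (acc : List Int) (d0 : Int),
    cs.foldl (fun acc c =>
        let d := acc.2 + (if c == '{' then 1 else 0) - (if c == '}' then 1 else 0)
        (acc.1 ++ [d], d)) (acc, d0)
      = (acc ++ (List.range cs.length).map (fun k => d0 + bbD (cs.take (k + 1))), d0 + bbD cs) := by
  induction cs with
  | nil => intro acc d0; simp [bbD]
  | cons c cs ih =>
    intro acc d0
    simp only [List.foldl_cons]
    rw [ih]
    refine Prod.ext ?_ ?_
    · simp only [List.length_cons, List.range_succ_eq_map, List.map_cons, List.map_map]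
      rw [List.append_assoc]
      congr 1
      simp only [List.singleton_append, List.cons.injEq, List.take_succ_cons,
        List.take_zero, bbD]
      constructor
      · simp only [beq_iff_eq]; split_ifs <;> simp_all [bbDelta] <;> ring
      · apply List.map_congr_left
        intro k _
        simp only [beq_iff_eq]; split_ifs <;> simp_all [bbDelta] <;> ring
    · simp only [bbD_cons, beq_iff_eq]; split_ifs <;> simp_all [bbDelta] <;> ring

theorem bbDepths_fst (cs : List Char) :
    (bbDepths cs).1 = (List.range cs.length).map (fun k => bbD (cs.take (k + 1))) := by
  unfold bbDepths
  rw [bbDepths_go]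
  simp

theorem bbDepths_fst_snoc (cs : List Char) (c : Char) :
    (bbDepths (cs ++ [c])).1 = (bbDepths cs).1 ++ [bbD (cs ++ [c])] := by
  rw [bbDepths_fst, bbDepths_fst]
  simp only [List.length_append, List.length_cons, List.length_nil, List.range_succ,
    List.map_append, List.map_cons, List.map_nil]
  congr 1
  · apply List.map_congr_left
    intro k hk
    simp only [List.mem_range] at hk
    rw [List.take_append_of_le_length (by omega)]
  · rw [List.take_of_length_le (by simp)]

theorem bbScan_append (cs : List Char) (c : Char) (ds : List Int) (d : Int)
    (hlen : ds.length = cs.length) :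
    ∀ n, n ≤ cs.length → bbScan (cs ++ [c]) (ds ++ [d]) n = bbScan cs ds n := by
  intro n
  induction n with
  | zero => intro _; rfl
  | succ m ih =>
    intro hm
    have hm' : m < cs.length := hm
    unfold bbScan
    rw [List.getElem?_append_left hm', List.getElem?_append_left (by omega),
      List.take_append_of_le_length (by omega), ih (by omega)]

-- the "record nothing at this step" case: appending c does not change A's answer
theorem bbUnchanged (cs : List Char) (ds : List Int) (c : Char) (lg : Int)
    (hb : -1 ≤ lg ∧ lg < cs.length)
    (ih : (if lg != -1 then some (String.ofList (PySem.List.slice cs none (some (lg + 1))))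
            else none) = bbScan cs ds cs.length) :
    (if lg != -1 then some (String.ofList (PySem.List.slice (cs ++ [c]) none (some (lg + 1))))
      else none) = bbScan cs ds cs.length := by
  by_cases hlg : lg = -1
  · simpa [hlg] using ih
  · have h0 : (0 : Int) ≤ lg + 1 := by omega
    rw [← ih, PySem.List.slice_to _ h0, PySem.List.slice_to _ h0,
      List.take_append_of_le_length (by omega)]

-- the central lemma: A's loop result equals B's table + backward scan, for every char list
theorem bbMain (cs : List Char) :
    (if (bbFoldA cs).2 != -1 then
        some (String.ofList (PySem.List.slice cs none (some ((bbFoldA cs).2 + 1))))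
      else none) = bbScan cs (bbDepths cs).1 cs.length := by
  induction cs using List.reverseRecOn with
  | nil => simp [bbFoldA, PySem.List.enumerate_nil, bbScan]
  | append_singleton cs c ih =>
    have hdlen : (bbDepths cs).1.length = cs.length := by rw [bbDepths_fst]; simp
    have hb := bbFoldA_snd_bounds cs
    have hlen : (cs ++ [c]).length = cs.length + 1 := by simp
    rw [hlen, bbDepths_fst_snoc]
    unfold bbScan
    have hget : (cs ++ [c])[cs.length]? = some c := by
      rw [List.getElem?_append_right (le_refl _)]; simp
    have hdget : ((bbDepths cs).1 ++ [bbD (cs ++ [c])])[cs.length]? = some (bbD (cs ++ [c])) := by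
      rw [List.getElem?_append_right (by omega)]; simp [hdlen]
    rw [hget, hdget, bbFoldA_snoc]
    by_cases h2 : c = '}'
    · subst h2
      have hD : bbD (cs ++ ['}']) = bbD cs - 1 := by
        rw [bbD_snoc]
        have : bbDelta '}' = -1 := by decide
        omega
      have hstep2 : (bbStepA (bbFoldA cs) ((cs.length : Int), '}')).2
          = if bbD cs - 1 == 0 then ((cs.length : Int)) else (bbFoldA cs).2 := by
        simp [bbStepA, bbFoldA_fst]
      rw [hstep2]
      by_cases hd : bbD cs - 1 = 0
      · -- A records cs.length; B's scan fires at index cs.length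
        have hcond : ((some '}' == some '}') && (some (bbD (cs ++ ['}'])) == some 0)) = true := by
          rw [hD, hd]; decide
        rw [hcond]
        have hne : (((cs.length : Int)) != -1) = true := by
          simp only [bne_iff_ne, ne_eq]
          omega
        simp only [hd, beq_self_eq_true, if_true, hne]
        rw [PySem.List.slice_to _ (by omega)]
        have ht : (((cs.length : Int)) + 1).toNat = cs.length + 1 := by omega
        rw [ht]
      · have hcond : ((some '}' == some '}') && (some (bbD (cs ++ ['}'])) == some 0)) = false := by
          rw [hD]
          simp [hd]
        rw [hcond]
        simp only [Bool.false_eq_true, if_false]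
        have hif : (if bbD cs - 1 == 0 then ((cs.length : Int)) else (bbFoldA cs).2)
            = (bbFoldA cs).2 := by
          simp [hd]
        rw [hif, bbScan_append cs '}' _ _ hdlen cs.length (le_refl _)]
        exact bbUnchanged cs _ '}' _ hb ih
    · -- c is not '}': A's last_good unchanged, B's condition fails on the char
      have hcond : ((some c == some '}') && (some (bbD (cs ++ [c])) == some 0)) = false := by
        simp [h2]
      rw [hcond]
      simp only [Bool.false_eq_true, if_false]
      have hsnd : (bbStepA (bbFoldA cs) ((cs.length : Int), c)).2 = (bbFoldA cs).2 := by
        simp only [bbStepA]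
        by_cases h1 : c == '{' <;> simp_all
      rw [hsnd, bbScan_append cs c _ _ hdlen cs.length (le_refl _)]
      exact bbUnchanged cs _ c _ hb ih

-- ===== VERDICT (by name: the statement is the Claim_ definition above) =====
theorem balance_braces_spec : Claim_equal_balance_braces := by
  intro s _
  unfold Spec_balance_braces balance_braces balance_braces_alt
  by_cases h : (PySem.Str.find s "{") == -1
  · simp only [h, if_true]
  · simp only [h, Bool.false_eq_true, if_false]
    exact bbMain _
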